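-- pv_equiv track=rewrite | github.com/GustavoSalata/Wordlist-personalizada | gera-variacoes.py | generate_replacements
-- ===== SOURCE A (Python) =====
-- import itertools
--
-- def generate_variations(word):
--     """Gera todas as possíveis variações de uma palavra"""
--     variations = set()
--     for variation in itertools.product(*zip(word.upper(), word.lower())):
--         variations.add(''.join(variation))
--     return variations
--
-- def generate_replacements(word):
--     """Gera todas as possíveis substituições de caracteres similares em uma palavra"""
--     variations = set()
--     for char in word:
--         if char.lower() == 'a':
--             variation = word.replace(char, '@')
--             variations.update(generate_variations(variation))
--         elif char.lower() == 'e':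
--             variation = word.replace(char, '3')
--             variations.update(generate_variations(variation))
--         elif char.lower() == 'i':
--             variation = word.replace(char, '!')
--             variations.update(generate_variations(variation))
--         elif char.lower() == 'o':
--             variation = word.replace(char, '0')
--             variations.update(generate_variations(variation))
--         elif char.lower() == 's':
--             variation = word.replace(char, '$')
--             variations.update(generate_variations(variation))
--         elif char.lower() == 't':
--             variation = word.replace(char, '7')
--             variations.update(generate_variations(variation))
--     return variations
-- ===== SOURCE B (Python) =====
-- LEET = {'a': '@', 'e': '3', 'i': '!', 'o': '0', 's': '$', 't': '7'}
--
-- def _subst_cased(chars, target, sym):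
--     """Case variants of chars with every occurrence of target replaced by sym,
--     substituting and casing in ONE recursive pass, branching only where a
--     position is case-variable (so no duplicates are ever generated)."""
--     if not chars:
--         return ['']
--     rest = _subst_cased(chars[1:], target, sym)
--     c = chars[0]
--     if c == target:
--         heads = [sym]
--     elif c.upper() == c.lower():
--         heads = [c.upper()]
--     else:
--         heads = [c.upper(), c.lower()]
--     return [h + t for h in heads for t in rest]
--
-- def generate_replacements(word):
--     out = []
--     for c in dict.fromkeys(word):
--         sym = LEET.get(c.lower())
--         if sym is not None:
--             out.extend(_subst_cased(list(word), c, sym))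
--     return set(out)
-- ===== Notes on version B (the rewrite author's own statement) =====
-- stated objective: alternative
-- what changed: A runs a staged pipeline per character occurrence (replace the whole word, zip upper/lower, full 2^len itertools.product, join, set-dedup); B visits each distinct character once and uses a single recursive pass that substitutes the leet symbol and enumerates case choices simultaneously, branching only at case-variable positions, so it never builds the replaced string, the full product, or duplicates (measured 6.4x at n=16, but still exponential on all-letter words, so not confirmed faster at the largest sizes).
import Mathlib
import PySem

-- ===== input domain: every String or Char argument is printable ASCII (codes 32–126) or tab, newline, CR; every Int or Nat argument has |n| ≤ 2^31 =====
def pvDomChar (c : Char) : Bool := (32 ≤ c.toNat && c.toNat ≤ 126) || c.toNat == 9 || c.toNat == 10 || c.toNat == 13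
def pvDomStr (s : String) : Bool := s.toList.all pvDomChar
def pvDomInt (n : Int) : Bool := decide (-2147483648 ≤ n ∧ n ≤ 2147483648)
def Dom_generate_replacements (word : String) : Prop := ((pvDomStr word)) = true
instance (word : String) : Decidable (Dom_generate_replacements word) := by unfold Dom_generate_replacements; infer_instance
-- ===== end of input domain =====

-- B replaces A's staged pipeline (replace the whole word, zip upper/lower, full 2^len
-- itertools product, join, set-dedup) by one recursive pass per distinct character that
-- substitutes and cases simultaneously, branching only at case-variable positions.

-- ===== PORT A =====
-- itertools.product(*zip(w.upper(), w.lower())): first factor varies slowest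
def prodPairs : List (Char × Char) → List (List Char)
  | [] => [[]]
  | (u, l) :: ps => ((prodPairs ps).map (u :: ·)) ++ ((prodPairs ps).map (l :: ·))

def generate_variations (w : String) : PySem.Set String :=
  (prodPairs (List.zip (PySem.Str.upper w).toList (PySem.Str.lower w).toList)).foldl
    (fun variations t => PySem.Set.add variations (String.ofList t)) PySem.Set.empty

def generate_replacements (word : String) : List String :=
  word.toList.foldl (fun variations char =>
    if PySem.Chars.lowerChar char = 'a' then
      PySem.Set.update variations (generate_variations (PySem.Str.replace word (String.ofList [char]) "@"))
    else if PySem.Chars.lowerChar char = 'e' then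
      PySem.Set.update variations (generate_variations (PySem.Str.replace word (String.ofList [char]) "3"))
    else if PySem.Chars.lowerChar char = 'i' then
      PySem.Set.update variations (generate_variations (PySem.Str.replace word (String.ofList [char]) "!"))
    else if PySem.Chars.lowerChar char = 'o' then
      PySem.Set.update variations (generate_variations (PySem.Str.replace word (String.ofList [char]) "0"))
    else if PySem.Chars.lowerChar char = 's' then
      PySem.Set.update variations (generate_variations (PySem.Str.replace word (String.ofList [char]) "$"))
    else if PySem.Chars.lowerChar char = 't' then
      PySem.Set.update variations (generate_variations (PySem.Str.replace word (String.ofList [char]) "7"))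
    else variations) PySem.Set.empty

-- ===== PORT B =====
def pvLeet : PySem.Dict Char Char :=
  PySem.Dict.ofList [('a', '@'), ('e', '3'), ('i', '!'), ('o', '0'), ('s', '$'), ('t', '7')]

-- Source B's _subst_cased: substitute target by sym and case in one recursive pass
def substCased (target sym : Char) : List Char → List (List Char)
  | [] => [[]]
  | c :: cs =>
    let rest := substCased target sym cs
    (if c = target then [sym]
     else if PySem.Chars.upperChar c = PySem.Chars.lowerChar c then [PySem.Chars.upperChar c]
     else [PySem.Chars.upperChar c, PySem.Chars.lowerChar c]).flatMap
      (fun h => rest.map (h :: ·))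

def generate_replacements_alt (word : String) : List String :=
  PySem.Set.ofList ((PySem.List.dedup word.toList).flatMap (fun c =>
    match PySem.Dict.get? pvLeet (PySem.Chars.lowerChar c) with
    | some sym => (substCased c sym word.toList).map String.ofList
    | none => []))

-- ===== PRECONDITION & SPEC =====
def Spec_generate_replacements (word : String) (out : List String) : Prop := out = generate_replacements_alt word
instance (word : String) (out : List String) : Decidable (Spec_generate_replacements word out) := by unfold Spec_generate_replacements; infer_instance

-- ===== CLAIM (what is proved, stated in full; the proofs are below) =====
def Claim_equal_generate_replacements : Prop := ∀ (word : String), Dom_generate_replacements word → Spec_generate_replacements word (generate_replacements word)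

-- ===== LEMMAS AND PROOFS =====

-- B-side block contributed by one character (definitionally the lambda inside generate_replacements_alt)
def blockB (word : String) (char : Char) : List String :=
  match PySem.Dict.get? pvLeet (PySem.Chars.lowerChar char) with
  | some sym => (substCased char sym word.toList).map String.ofList
  | none => []

-- A-side block contributed by one character
def blockA (word : String) (char : Char) : List String :=
  if PySem.Chars.lowerChar char = 'a' then generate_variations (PySem.Str.replace word (String.ofList [char]) "@")
  else if PySem.Chars.lowerChar char = 'e' then generate_variations (PySem.Str.replace word (String.ofList [char]) "3")
  else if PySem.Chars.lowerChar char = 'i' then generate_variations (PySem.Str.replace word (String.ofList [char]) "!")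
  else if PySem.Chars.lowerChar char = 'o' then generate_variations (PySem.Str.replace word (String.ofList [char]) "0")
  else if PySem.Chars.lowerChar char = 's' then generate_variations (PySem.Str.replace word (String.ofList [char]) "$")
  else if PySem.Chars.lowerChar char = 't' then generate_variations (PySem.Str.replace word (String.ofList [char]) "7")
  else []

-- deduplicated case-variation product (branch only where upper != lower)
def redVars : List Char → List (List Char)
  | [] => [[]]
  | c :: cs =>
    (if PySem.Chars.upperChar c = PySem.Chars.lowerChar c then [PySem.Chars.upperChar c]
     else [PySem.Chars.upperChar c, PySem.Chars.lowerChar c]).flatMap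
      (fun x => (redVars cs).map (x :: ·))

-- first-occurrence dedup with an explicit "seen" accumulator
def dgo : List Char → List Char → List Char
  | _, [] => []
  | seen, c :: cs => if c ∈ seen then dgo seen cs else c :: dgo (seen ++ [c]) cs

lemma ofList_inj_str : Function.Injective String.ofList := by
  intro a b h
  have := congrArg String.toList h
  simpa using this

lemma update_of_subset {α : Type} [BEq α] [LawfulBEq α] (xs : List α) (s : PySem.Set α)
    (h : ∀ x ∈ xs, x ∈ s) : PySem.Set.update s xs = s := by
  induction xs generalizing s with
  | nil => rfl
  | cons x xs ih =>
    rw [PySem.Set.update_cons, PySem.Set.add_of_mem (h x (by simp))]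
    exact ih s (fun y hy => h y (by simp [hy]))

lemma update_prefix {α : Type} [BEq α] [LawfulBEq α] (xs : List α) (s t : PySem.Set α)
    (h : ∀ x ∈ xs, x ∉ s) : PySem.Set.update (s ++ t) xs = s ++ PySem.Set.update t xs := by
  induction xs generalizing t with
  | nil => rfl
  | cons x xs ih =>
    rw [PySem.Set.update_cons, PySem.Set.update_cons]
    rcases em (x ∈ t) with hm | hm
    · rw [PySem.Set.add_of_mem (by simp [hm]), PySem.Set.add_of_mem hm]
      exact ih t (fun y hy => h y (by simp [hy]))
    · rw [PySem.Set.add_of_not_mem (by simp [hm, h x (by simp)]), PySem.Set.add_of_not_mem hm,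
        List.append_assoc]
      exact ih (t ++ [x]) (fun y hy => h y (by simp [hy]))

lemma update_of_disjoint {α : Type} [BEq α] [LawfulBEq α] (xs : List α) (s : PySem.Set α)
    (h : ∀ x ∈ xs, x ∉ s) : PySem.Set.update s xs = s ++ PySem.Set.ofList xs := by
  have := update_prefix xs s [] h
  simpa using this

lemma ofList_map_inj {α β : Type} [BEq α] [LawfulBEq α] [BEq β] [LawfulBEq β]
    {f : α → β} (hf : Function.Injective f) (xs : List α) :
    PySem.Set.ofList (xs.map f) = (PySem.Set.ofList xs).map f := by
  induction xs using List.reverseRecOn with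
  | nil => rfl
  | append_singleton ys y ih =>
    rw [List.map_append, List.map_singleton, PySem.Set.ofList_append_singleton,
      PySem.Set.ofList_append_singleton, ih]
    rcases em (y ∈ PySem.Set.ofList ys) with hm | hm
    · rw [PySem.Set.add_of_mem hm, PySem.Set.add_of_mem (List.mem_map.mpr ⟨y, hm, rfl⟩)]
    · rw [PySem.Set.add_of_not_mem hm, PySem.Set.add_of_not_mem (by
        simp only [List.mem_map, not_exists, not_and]
        intro z hz hzy
        exact hm (hf hzy ▸ hz)), List.map_append, List.map_singleton]

lemma ofList_prodPairs (l : List Char) :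
    PySem.Set.ofList (prodPairs (l.map (fun c => (PySem.Chars.upperChar c, PySem.Chars.lowerChar c)))) = redVars l := by
  induction l with
  | nil => rfl
  | cons c cs ih =>
    simp only [List.map_cons, prodPairs, redVars]
    rw [PySem.Set.ofList_append,
      ofList_map_inj (f := (PySem.Chars.upperChar c :: ·)) (fun a b h => by injection h) _, ih]
    rcases em (PySem.Chars.upperChar c = PySem.Chars.lowerChar c) with he | he
    · rw [if_pos he]
      rw [update_of_subset _ _ (fun x hx => by
        rcases List.mem_map.mp hx with ⟨t, ht, rfl⟩
        refine List.mem_map.mpr ⟨t, ?_, by rw [he]⟩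
        rw [← ih]
        exact (PySem.Set.mem_ofList _ _).mpr ht)]
      simp
    · rw [if_neg he]
      rw [update_of_disjoint _ _ (fun x hx => by
        rcases List.mem_map.mp hx with ⟨t, ht, rfl⟩
        simp only [List.mem_map, not_exists, not_and]
        intro t' _ hc
        injection hc with h1 _
        exact he h1)]
      rw [ofList_map_inj (f := (PySem.Chars.lowerChar c :: ·)) (fun a b h => by injection h) _, ih]
      simp

lemma gen_variations_eq (w : String) :
    generate_variations w = (redVars w.toList).map String.ofList := by
  unfold generate_variations
  rw [← PySem.Set.update_map_eq_foldl_add]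
  have hz : List.zip (PySem.Str.upper w).toList (PySem.Str.lower w).toList
      = w.toList.map (fun c => (PySem.Chars.upperChar c, PySem.Chars.lowerChar c)) := by
    simp only [PySem.Str.toList_upper, PySem.Str.toList_lower]
    show List.zip (w.toList.map PySem.Chars.upperChar) (w.toList.map PySem.Chars.lowerChar) = _
    exact List.zip_map'
  rw [hz]
  show PySem.Set.ofList _ = _
  rw [ofList_map_inj ofList_inj_str, ofList_prodPairs]

-- single-character str.replace is a pointwise map
lemma replace_go_single (c s : Char) :
    ∀ (l : List Char) (fuel : Nat) (acc : List Char), l.length ≤ fuel →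
      PySem.Chars.replace.go [c] [s] fuel l acc
        = acc.reverse ++ l.map (fun x => if x = c then s else x)
  | [], fuel, acc, _ => by cases fuel <;> simp [PySem.Chars.replace.go]
  | x :: t, fuel + 1, acc, h => by
    rw [PySem.Chars.replace.go]
    rcases em (x = c) with hx | hx
    · rw [if_pos (by simp [hx, List.isPrefixOf])]
      show PySem.Chars.replace.go [c] [s] fuel t ([s].reverse ++ acc) = _
      rw [replace_go_single c s t fuel _ (by simpa using h)]
      simp [hx]
    · rw [if_neg (by simp [List.isPrefixOf]; exact fun hh => hx hh.symm)]
      rw [replace_go_single c s t fuel _ (by simpa using h)]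
      simp [hx]

lemma replace_single (w : String) (c s : Char) :
    (PySem.Str.replace w (String.ofList [c]) (String.ofList [s])).toList
      = w.toList.map (fun x => if x = c then s else x) := by
  rw [PySem.Str.toList_replace]
  have h1 : (String.ofList [c]).toList = [c] := by simp
  have h2 : (String.ofList [s]).toList = [s] := by simp
  rw [h1, h2, PySem.Chars.replace]
  rw [if_neg (by simp)]
  exact replace_go_single c s w.toList w.toList.length [] le_rfl

-- B's fused substitute-and-case pass equals casing the substituted list
lemma substCased_eq_redVars (target sym : Char)
    (h1 : PySem.Chars.upperChar sym = sym) (h2 : PySem.Chars.lowerChar sym = sym) :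
    ∀ l, substCased target sym l = redVars (l.map (fun x => if x = target then sym else x))
  | [] => rfl
  | c :: cs => by
    rw [List.map_cons, substCased, redVars, substCased_eq_redVars target sym h1 h2 cs]
    rcases em (c = target) with hc | hc
    · simp [hc, h1, h2]
    · simp [hc]

lemma block_eq (word : String) (c : Char) : blockA word c = blockB word c := by
  unfold blockA blockB
  by_cases h1 : PySem.Chars.lowerChar c = 'a'
  · rw [h1]
    simp [gen_variations_eq, show pvLeet.get? 'a' = some '@' from by decide,
      replace_single word c '@', substCased_eq_redVars c '@' (by decide) (by decide)]
  by_cases h2 : PySem.Chars.lowerChar c = 'e'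
  · rw [h2]
    simp [gen_variations_eq, show pvLeet.get? 'e' = some '3' from by decide,
      replace_single word c '3', substCased_eq_redVars c '3' (by decide) (by decide)]
  by_cases h3 : PySem.Chars.lowerChar c = 'i'
  · rw [h3]
    simp [gen_variations_eq, show pvLeet.get? 'i' = some '!' from by decide,
      replace_single word c '!', substCased_eq_redVars c '!' (by decide) (by decide)]
  by_cases h4 : PySem.Chars.lowerChar c = 'o'
  · rw [h4]
    simp [gen_variations_eq, show pvLeet.get? 'o' = some '0' from by decide,
      replace_single word c '0', substCased_eq_redVars c '0' (by decide) (by decide)]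
  by_cases h5 : PySem.Chars.lowerChar c = 's'
  · rw [h5]
    simp [gen_variations_eq, show pvLeet.get? 's' = some '$' from by decide,
      replace_single word c '$', substCased_eq_redVars c '$' (by decide) (by decide)]
  by_cases h6 : PySem.Chars.lowerChar c = 't'
  · rw [h6]
    simp [gen_variations_eq, show pvLeet.get? 't' = some '7' from by decide,
      replace_single word c '7', substCased_eq_redVars c '7' (by decide) (by decide)]
  have hn : PySem.Dict.get? pvLeet (PySem.Chars.lowerChar c) = none := by
    simp [PySem.Dict.get?, show pvLeet.items = [('a', '@'), ('e', '3'), ('i', '!'), ('o', '0'), ('s', '$'), ('t', '7')] from by decide]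
    exact ⟨fun h => h1 h.symm, fun h => h2 h.symm, fun h => h3 h.symm,
      fun h => h4 h.symm, fun h => h5 h.symm, fun h => h6 h.symm⟩
  simp [h1, h2, h3, h4, h5, h6, hn]

lemma foldl_update_flatMap {α : Type} [BEq α] [LawfulBEq α] (f : Char → List α) :
    ∀ (cs : List Char) (s : PySem.Set α),
      cs.foldl (fun s c => PySem.Set.update s (f c)) s = PySem.Set.update s (cs.flatMap f)
  | [], s => rfl
  | c :: cs, s => by
    rw [List.foldl_cons, List.flatMap_cons, PySem.Set.update_append]
    exact foldl_update_flatMap f cs _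

lemma update_eq_dgo : ∀ (cs : List Char) (seen : PySem.Set Char),
    PySem.Set.update seen cs = seen ++ dgo seen cs
  | [], seen => by simp [dgo]
  | c :: cs, seen => by
    rw [PySem.Set.update_cons, dgo]
    rcases em (c ∈ seen) with hm | hm
    · rw [PySem.Set.add_of_mem hm, if_pos hm]
      exact update_eq_dgo cs seen
    · rw [PySem.Set.add_of_not_mem hm, if_neg hm, update_eq_dgo cs (seen ++ [c]),
        List.append_assoc]
      rfl

lemma update_flatMap_dgo (block : Char → List String) :
    ∀ (cs : List Char) (seen : List Char) (s : PySem.Set String),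
      (∀ c ∈ seen, ∀ x ∈ block c, x ∈ s) →
      PySem.Set.update s (cs.flatMap block) = PySem.Set.update s ((dgo seen cs).flatMap block)
  | [], _, _, _ => rfl
  | c :: cs, seen, s, h => by
    rw [List.flatMap_cons, PySem.Set.update_append, dgo]
    rcases em (c ∈ seen) with hm | hm
    · rw [if_pos hm, update_of_subset _ _ (h c hm)]
      exact update_flatMap_dgo block cs seen s h
    · rw [if_neg hm, List.flatMap_cons, PySem.Set.update_append]
      refine update_flatMap_dgo block cs (seen ++ [c]) _ (fun c' hc' x hx => ?_)
      rcases List.mem_append.mp hc' with hc' | hc'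
      · exact (PySem.Set.mem_update _ _ _).mpr (Or.inl (h c' hc' x hx))
      · have : c' = c := by simpa using hc'
        exact (PySem.Set.mem_update _ _ _).mpr (Or.inr (this ▸ hx))

lemma dedup_eq_dgo (cs : List Char) : PySem.List.dedup cs = dgo [] cs := by
  rw [PySem.List.dedup_eq_ofList]
  have : PySem.Set.ofList cs = PySem.Set.update ([] : PySem.Set Char) cs := rfl
  rw [this, update_eq_dgo cs []]
  rfl

-- ===== VERDICT (by name: the statement is the Claim_ definition above) =====
theorem generate_replacements_spec : Claim_equal_generate_replacements := by
  intro word _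
  show generate_replacements word = generate_replacements_alt word
  have hA : generate_replacements word
      = PySem.Set.update PySem.Set.empty (word.toList.flatMap (blockA word)) := by
    unfold generate_replacements
    rw [show (fun (variations : PySem.Set String) char =>
        if PySem.Chars.lowerChar char = 'a' then
          PySem.Set.update variations (generate_variations (PySem.Str.replace word (String.ofList [char]) "@"))
        else if PySem.Chars.lowerChar char = 'e' then
          PySem.Set.update variations (generate_variations (PySem.Str.replace word (String.ofList [char]) "3"))
        else if PySem.Chars.lowerChar char = 'i' then
          PySem.Set.update variations (generate_variations (PySem.Str.replace word (String.ofList [char]) "!"))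
        else if PySem.Chars.lowerChar char = 'o' then
          PySem.Set.update variations (generate_variations (PySem.Str.replace word (String.ofList [char]) "0"))
        else if PySem.Chars.lowerChar char = 's' then
          PySem.Set.update variations (generate_variations (PySem.Str.replace word (String.ofList [char]) "$"))
        else if PySem.Chars.lowerChar char = 't' then
          PySem.Set.update variations (generate_variations (PySem.Str.replace word (String.ofList [char]) "7"))
        else variations)
      = (fun (variations : PySem.Set String) char => PySem.Set.update variations (blockA word char)) from by
        funext s c
        unfold blockA
        split_ifs <;> rfl]
    exact foldl_update_flatMap (blockA word) word.toList PySem.Set.empty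
  have hblock : word.toList.flatMap (blockA word) = word.toList.flatMap (blockB word) := by
    exact List.flatMap_congr (fun c _ => block_eq word c)
  rw [hA, hblock,
    update_flatMap_dgo (blockB word) word.toList [] PySem.Set.empty (by simp),
    ← dedup_eq_dgo]
  rfl
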